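-- pv_equiv track=rewrite | github.com/nicosnow-cl/improved-bwacs | restricted_bwacs_model.py | generateSolutionArcs
-- ===== SOURCE A (Python) =====
-- def generateSolutionArcs(solution):
--     solution_arcs = []
--
--     for route in solution:
--         route_arcs = []
--
--         for pos, i in enumerate(route):
--             if pos == 0:
--                 before_node = i
--             else:
--                 route_arcs.append((before_node, i))
--                 before_node = i
--
--         solution_arcs.append(route_arcs)
--
--     return solution_arcs
-- ===== SOURCE B (Python) =====
-- def generateSolutionArcs(solution):
--     def arcs(route):
--         # structural recursion: head pair, then recurse on the tail
--         if len(route) < 2: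
--             return []
--         return [(route[0], route[1])] + arcs(route[1:])
--     return [arcs(route) for route in solution]
-- ===== Notes on version B (the rewrite author's own statement) =====
-- stated objective: alternative
-- what changed: Replaces A's enumerate loop with before_node state and pos==0 guard by a recursive decomposition: a helper peels the head pair (route[0], route[1]) and recurses on the tail, with no loop, index counter or remembered-previous state.
import Mathlib
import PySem

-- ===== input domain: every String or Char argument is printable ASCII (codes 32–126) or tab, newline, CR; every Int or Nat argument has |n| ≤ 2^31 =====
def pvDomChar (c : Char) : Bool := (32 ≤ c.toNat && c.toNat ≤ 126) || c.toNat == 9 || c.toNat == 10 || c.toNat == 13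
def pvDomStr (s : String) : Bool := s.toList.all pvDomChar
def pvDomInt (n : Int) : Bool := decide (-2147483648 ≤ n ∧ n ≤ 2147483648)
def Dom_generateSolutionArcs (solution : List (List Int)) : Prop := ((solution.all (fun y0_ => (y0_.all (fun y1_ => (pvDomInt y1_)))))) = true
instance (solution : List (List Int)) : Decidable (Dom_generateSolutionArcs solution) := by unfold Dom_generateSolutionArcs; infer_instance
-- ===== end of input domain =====

-- B replaces A's enumerate loop with before_node state by a recursive helper peeling the head pair and recursing on the tail; alternative decomposition, same result.

-- ===== PORT A =====
-- one step of the inner 'for pos, i in enumerate(route)' loop; state = (route_arcs, before_node)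
def arcStep (st : List (Int × Int) × Option Int) (pi : Int × Int) : List (Int × Int) × Option Int :=
  if pi.1 = 0 then (st.1, some pi.2)
  else (st.1 ++ [(st.2.getD 0, pi.2)], some pi.2)

def generateSolutionArcs (solution : List (List Int)) : List (List (Int × Int)) :=
  solution.foldl (fun solution_arcs route =>
    solution_arcs ++ [((PySem.List.enumerate route 0).foldl arcStep ([], none)).1]) []

-- ===== PORT B =====
-- recursive helper 'arcs' from Source B: if len(route) < 2 return []; else head pair ++ arcs(tail)
def arcsRec : List Int → List (Int × Int)
  | a :: b :: rest => (a, b) :: arcsRec (b :: rest)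
  | _ => []

def generateSolutionArcs_alt (solution : List (List Int)) : List (List (Int × Int)) :=
  solution.map (fun route => arcsRec route)

-- ===== PRECONDITION & SPEC =====
def Spec_generateSolutionArcs (solution : List (List Int)) (out : List (List (Int × Int))) : Prop := out = generateSolutionArcs_alt solution
instance (solution : List (List Int)) (out : List (List (Int × Int))) : Decidable (Spec_generateSolutionArcs solution out) := by unfold Spec_generateSolutionArcs; infer_instance

-- ===== CLAIM =====
def Claim_equal_generateSolutionArcs : Prop := ∀ (solution : List (List Int)), Dom_generateSolutionArcs solution → Spec_generateSolutionArcs solution (generateSolutionArcs solution)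

-- ===== LEMMAS AND PROOFS =====

theorem arcLoop_arcsRec (xs : List Int) : ∀ (s : Int), 1 ≤ s → ∀ (acc : List (Int × Int)) (b : Int),
    ((PySem.List.enumerate xs s).foldl arcStep (acc, some b)).1 = acc ++ arcsRec (b :: xs) := by
  induction xs with
  | nil => intro s _ acc b; simp [PySem.List.enumerate_nil, arcsRec]
  | cons i rest ih =>
    intro s hs acc b
    have hstep : arcStep (acc, some b) (s, i) = (acc ++ [(b, i)], some i) := by
      simp [arcStep]; omega
    rw [PySem.List.enumerate_cons, List.foldl_cons, hstep,
        ih (s + 1) (by omega) (acc ++ [(b, i)]) i]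
    simp [arcsRec]

theorem route_arcs_eq (route : List Int) :
    ((PySem.List.enumerate route 0).foldl arcStep ([], none)).1 = arcsRec route := by
  cases route with
  | nil => simp [PySem.List.enumerate_nil, arcsRec]
  | cons x xs =>
    rw [PySem.List.enumerate_cons, List.foldl_cons]
    have h0 : arcStep (([] : List (Int × Int)), none) ((0 : Int), x) = ([], some x) := by
      simp [arcStep]
    rw [h0]
    simpa using arcLoop_arcsRec xs 1 (by omega) [] x

theorem gsa_foldl_acc (sol : List (List Int)) : ∀ (acc : List (List (Int × Int))),
    sol.foldl (fun solution_arcs route =>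
      solution_arcs ++ [((PySem.List.enumerate route 0).foldl arcStep ([], none)).1]) acc
    = acc ++ sol.map (fun route => arcsRec route) := by
  induction sol with
  | nil => intro acc; simp
  | cons r rest ih =>
    intro acc
    rw [List.foldl_cons, ih]
    simp [route_arcs_eq]

-- ===== VERDICT =====
theorem generateSolutionArcs_spec : Claim_equal_generateSolutionArcs := by
  intro solution _
  unfold Spec_generateSolutionArcs generateSolutionArcs generateSolutionArcs_alt
  simpa using gsa_foldl_acc solution []
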